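-- pv_equiv track=rewrite | github.com/saujix/AdventOfCode | 2024/9.12.2024/q2.py | find_dots
-- ===== SOURCE A (Python) =====
-- def find_dots(data):
--     result = []
--     start = None
--     for i, val in enumerate(data):
--         if val == '.':
--             if start is None:
--                 start = i
--         else:
--             if start is not None:
--                 result.append((start, i - start))
--                 start = None
--     if start is not None:
--         result.append((start, len(data) - start))
--     return result
-- ===== SOURCE B (Python) =====
-- def find_dots(data):
--     result = []
--     i = 0
--     n = len(data)
--     while i < n:
--         run = 1
--         while i + run < n and data[i + run] == data[i]:
--             run += 1
--         if data[i] == '.':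
--             result.append((i, run))
--         i += run
--     return result
-- ===== Notes on version B (the rewrite author's own statement) =====
-- stated objective: alternative
-- what changed: Replaces A's start/None state machine over enumerate with a run scanner: an outer loop that measures each maximal run of equal consecutive elements and emits (start, length) only for '.' runs, jumping by the run length.
import Mathlib
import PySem

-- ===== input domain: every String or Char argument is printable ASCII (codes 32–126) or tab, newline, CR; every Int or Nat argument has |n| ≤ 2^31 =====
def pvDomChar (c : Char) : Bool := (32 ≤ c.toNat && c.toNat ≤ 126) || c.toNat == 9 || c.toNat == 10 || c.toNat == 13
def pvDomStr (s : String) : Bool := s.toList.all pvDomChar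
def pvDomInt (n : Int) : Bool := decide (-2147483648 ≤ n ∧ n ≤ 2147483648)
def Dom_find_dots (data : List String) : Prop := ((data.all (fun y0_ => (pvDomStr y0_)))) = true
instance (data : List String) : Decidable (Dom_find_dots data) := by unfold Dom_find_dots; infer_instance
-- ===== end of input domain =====

-- B replaces A's start/None state machine with a maximal-run scanner (same O(n) cost; objective: alternative decomposition).

-- ===== PORT A =====
-- the for-loop over enumerate(data), carrying (result, start, i); at [] the loop has
-- ended with i = len(data), so the final `if start is not None` append uses i - start.
def find_dots_go (result : List (Int × Int)) (start : Option Int) (i : Int) :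
    List String → List (Int × Int)
  | [] =>
    match start with
    | some s => result ++ [(s, i - s)]
    | none => result
  | v :: t =>
    if v = "." then
      match start with
      | none => find_dots_go result (some i) (i + 1) t
      | some _ => find_dots_go result start (i + 1) t
    else
      match start with
      | some s => find_dots_go (result ++ [(s, i - s)]) none (i + 1) t
      | none => find_dots_go result none (i + 1) t

def find_dots (data : List String) : List (Int × Int) :=
  find_dots_go [] none 0 data

-- ===== PORT B =====
-- inner while loop of B: length (as a Python int) of the prefix of t equal to v, and the rest
def pvRunSplit (v : String) : List String → Int × List String
  | [] => (0, [])
  | x :: t =>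
    if x = v then ((pvRunSplit v t).1 + 1, (pvRunSplit v t).2)
    else (0, x :: t)

lemma pvRunSplit_len (v : String) : ∀ t : List String, (pvRunSplit v t).2.length ≤ t.length
  | [] => le_refl _
  | x :: t => by
    simp only [pvRunSplit]
    split
    · exact le_trans (pvRunSplit_len v t) (Nat.le_succ _)
    · simp

-- outer while loop of B: measure the maximal run at the front, emit it if it is dots, jump past it
def find_dots_alt_go (i : Int) : List String → List (Int × Int)
  | [] => []
  | v :: t =>
    (if v = "." then [(i, (pvRunSplit v t).1 + 1)] else []) ++
      find_dots_alt_go (i + (pvRunSplit v t).1 + 1) (pvRunSplit v t).2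
termination_by xs => xs.length
decreasing_by simpa using Nat.lt_succ_of_le (pvRunSplit_len v t)

def find_dots_alt (data : List String) : List (Int × Int) :=
  find_dots_alt_go 0 data

-- ===== PRECONDITION & SPEC =====
def Spec_find_dots (data : List String) (out : List (Int × Int)) : Prop := out = find_dots_alt data
instance (data : List String) (out : List (Int × Int)) : Decidable (Spec_find_dots data out) := by unfold Spec_find_dots; infer_instance

-- ===== CLAIM (what is proved, stated in full; the proofs are below) =====
def Claim_equal_find_dots : Prop := ∀ (data : List String), Dom_find_dots data → Spec_find_dots data (find_dots data)

-- ===== LEMMAS AND PROOFS =====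

-- B's scanner never emits anything inside a run of non-dot elements: skipping a
-- non-dot run element by element lands at the same place as jumping past it.
lemma altgo_skip (v : String) (hv : ¬ v = ".") (t : List String) (j : Int) :
    find_dots_alt_go j t =
      find_dots_alt_go (j + (pvRunSplit v t).1) (pvRunSplit v t).2 := by
  cases t with
  | nil => simp [pvRunSplit, find_dots_alt_go]
  | cons x t =>
    by_cases hx : x = v
    · subst hx
      simp only [pvRunSplit, reduceIte, find_dots_alt_go, if_neg hv]
      simp [add_assoc]
    · simp [pvRunSplit, hx]

-- the joint invariant of A's loop: in state `none` the remainder of A's fold is B's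
-- scanner output; in state `some s` it is that output preceded by the pending dot run.
lemma find_dots_main : ∀ (n : Nat) (xs : List String), xs.length ≤ n →
    (∀ (res : List (Int × Int)) (i : Int),
       find_dots_go res none i xs = res ++ find_dots_alt_go i xs) ∧
    (∀ (res : List (Int × Int)) (s i : Int),
       find_dots_go res (some s) i xs =
         res ++ (s, i - s + (pvRunSplit "." xs).1) ::
           find_dots_alt_go (i + (pvRunSplit "." xs).1) (pvRunSplit "." xs).2) := by
  intro n
  induction n with
  | zero =>
    intro xs hxs
    have hx : xs = [] := List.eq_nil_of_length_eq_zero (Nat.le_zero.mp hxs)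
    subst hx
    refine ⟨fun res i => by simp [find_dots_go, find_dots_alt_go],
            fun res s i => by simp [find_dots_go, find_dots_alt_go, pvRunSplit]⟩
  | succ n ih =>
    intro xs hxs
    cases xs with
    | nil =>
      refine ⟨fun res i => by simp [find_dots_go, find_dots_alt_go],
              fun res s i => by simp [find_dots_go, find_dots_alt_go, pvRunSplit]⟩
    | cons v t =>
      have ht : t.length ≤ n := by simpa using Nat.lt_succ_iff.mp (by simpa using hxs)
      obtain ⟨ih1, ih2⟩ := ih t ht
      by_cases hv : v = "."
      · subst hv
        constructor
        · intro res i
          rw [show find_dots_go res none i ("." :: t)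
                = find_dots_go res (some i) (i + 1) t by simp [find_dots_go]]
          rw [ih2]
          simp only [find_dots_alt_go, reduceIte]
          rw [show i + 1 - i + (pvRunSplit "." t).1 = (pvRunSplit "." t).1 + 1 by ring,
              show i + 1 + (pvRunSplit "." t).1 = i + ((pvRunSplit "." t).1 + 1) by ring]
          simp [add_assoc]
        · intro res s i
          rw [show find_dots_go res (some s) i ("." :: t)
                = find_dots_go res (some s) (i + 1) t by simp [find_dots_go]]
          rw [ih2]
          simp only [pvRunSplit, reduceIte]
          rw [show i + 1 - s + (pvRunSplit "." t).1 = i - s + ((pvRunSplit "." t).1 + 1) by ring,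
              show i + 1 + (pvRunSplit "." t).1 = i + ((pvRunSplit "." t).1 + 1) by ring]
      · constructor
        · intro res i
          rw [show find_dots_go res none i (v :: t)
                = find_dots_go res none (i + 1) t by simp [find_dots_go, hv]]
          rw [ih1, altgo_skip v hv t (i + 1)]
          simp only [find_dots_alt_go, if_neg hv]
          rw [show i + 1 + (pvRunSplit v t).1 = i + (pvRunSplit v t).1 + 1 by ring]
          simp
        · intro res s i
          rw [show find_dots_go res (some s) i (v :: t)
                = find_dots_go (res ++ [(s, i - s)]) none (i + 1) t by simp [find_dots_go, hv]]
          rw [ih1, altgo_skip v hv t (i + 1)]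
          simp only [pvRunSplit, if_neg hv, find_dots_alt_go]
          rw [show i + 1 + (pvRunSplit v t).1 = i + (pvRunSplit v t).1 + 1 by ring]
          simp

-- ===== VERDICT (by name: the statement is the Claim_ definition above) =====
theorem find_dots_spec : Claim_equal_find_dots := by
  intro data _
  show find_dots data = find_dots_alt data
  have h := (find_dots_main data.length data (le_refl _)).1 [] 0
  simpa [find_dots, find_dots_alt] using h
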